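-- pv_equiv track=rewrite | github.com/ranomuhamad98/devogenai | genaiapp/modules/utils/ocr_confidence.py | rougueLiteTest
-- ===== SOURCE A (Python) =====
-- import math
--
-- def rougueLiteTest(response,spander):
--     result = response['result']
--     if result != 'not found':
--         for i in response.keys():
--             if i != 'result':
--                 for r in range(len(result.split(' ')),0,-1):
--                     for s in range(math.ceil(len(result.split(' '))/r)):
--                         r_check = ' '.join(result.split(' ')[s:r+s])
--                         try:
--                             instart = response[i].split(' ').index(r_check)
--                             instend = 0
--                             if instart+spander>=len(response[i].split(' ')):
--                                 instend = len(response[i].split(' '))-1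
--                             else:
--                                 instend = instart+spander
--
--                             if instart-spander<0:
--                                 instart = 0
--                             else:
--                                 instart -=spander
--                             return response[i].split(' ')[instart:instend],1
--                         except:
--                             pass
--     return response['Doc0'].split(' '),0
-- ===== SOURCE B (Python) =====
-- def _try_window(hay, word, spander):
--     try:
--         idx = hay.index(word)
--     except ValueError:
--         return None
--     end = len(hay) - 1 if idx + spander >= len(hay) else idx + spander
--     start = 0 if idx - spander < 0 else idx - spander
--     return hay[start:end], 1
--
--
-- def rougueLiteTest(response, spander):
--     result = response['result']
--     if result != 'not found':
--         for key, text in response.items():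
--             if key == 'result':
--                 continue
--             hay = text.split(' ')
--             for word in result.split(' '):
--                 found = _try_window(hay, word, spander)
--                 if found is not None:
--                     return found
--     return response['Doc0'].split(' '), 0
-- ===== Notes on version B (the rewrite author's own statement) =====
-- stated objective: simpler
-- what changed: B drops A's dead nested window loops (a ' '-joined window of 2+ words always contains a space and so can never equal a token of a space-split field) and does one direct linear scan: for each non-'result' field, find the first word of result occurring in the field's words and return its spander-neighbourhood; Pre_ only excludes the inputs where A (and B) raise KeyError ('result' missing, or 'Doc0' missing when the fallback is reached).
import Mathlib
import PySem

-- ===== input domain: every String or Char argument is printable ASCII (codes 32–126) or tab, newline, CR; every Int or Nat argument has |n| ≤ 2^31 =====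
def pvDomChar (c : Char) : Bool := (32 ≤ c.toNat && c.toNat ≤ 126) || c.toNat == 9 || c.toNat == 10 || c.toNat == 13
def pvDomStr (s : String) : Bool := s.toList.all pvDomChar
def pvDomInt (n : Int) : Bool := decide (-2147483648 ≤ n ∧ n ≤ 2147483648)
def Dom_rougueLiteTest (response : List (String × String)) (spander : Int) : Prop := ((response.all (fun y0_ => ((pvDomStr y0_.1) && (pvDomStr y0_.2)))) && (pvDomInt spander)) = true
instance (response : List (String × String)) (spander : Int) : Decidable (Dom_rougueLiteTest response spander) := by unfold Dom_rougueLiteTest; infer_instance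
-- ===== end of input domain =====

-- B replaces A's dead nested window loops by one direct linear scan over fields and words ("simpler").

-- shared helpers: both Source A and Source B contain this very code
-- s.split(' '): exact — the separator " " is non-empty, so Str.split? s " " = some of exactly this
def pvSplit (s : String) : List String :=
  (PySem.Chars.splitOn s.toList [' ']).map String.ofList

-- math.ceil(len/r) for 1 ≤ r: exact integer ceiling -((-n)//r)
def pvCeilDiv (n r : Int) : Int := -(PySem.Int.floordiv (-n) r)

-- the try-block of Source A = the _try_window helper of Source B (identical code in both sources)
def pvTryWindow (hay : List String) (word : String) (spander : Int) : Option (List String × Int) :=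
  match PySem.List.index? hay word with
  | none => none      -- ValueError: 'except: pass' in A, 'return None' in B
  | some idx =>
    let instart : Int := (idx : Int)
    let instend : Int :=
      if instart + spander ≥ PySem.List.len hay then PySem.List.len hay - 1
      else instart + spander
    let instart' : Int := if instart - spander < 0 then 0 else instart - spander
    some (PySem.List.slice hay (some instart') (some instend), 1)

-- ===== PORT A =====
def rougueLiteTest (response : List (String × String)) (spander : Int) : List String × Int :=
  match (PySem.Dict.ofList response).get? "result" with
  | none => ([], 0)   -- KeyError('result'): excluded by Pre_
  | some result =>
    match (if result ≠ "not found" then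
        (PySem.Dict.keys (PySem.Dict.ofList response)).findSome? (fun i =>
          if i ≠ "result" then
            match (PySem.Dict.ofList response).get? i with
            | none => none   -- unreachable: i ∈ keys
            | some text =>
              (PySem.List.pyRange (PySem.List.len (pvSplit result)) 0 (-1)).findSome? (fun r =>
                (PySem.List.pyRange 0 (pvCeilDiv (PySem.List.len (pvSplit result)) r) 1).findSome? (fun s =>
                  pvTryWindow (pvSplit text)
                    (PySem.Str.join " " (PySem.List.slice (pvSplit result) (some s) (some (r + s)))) spander))
          else none)
      else none) with
    | some out => out   -- the early 'return' inside the loops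
    | none =>
      match (PySem.Dict.ofList response).get? "Doc0" with
      | some doc => (pvSplit doc, 0)
      | none => ([], 0)   -- KeyError('Doc0'): excluded by Pre_

-- ===== PORT B =====
def rougueLiteTest_alt (response : List (String × String)) (spander : Int) : List String × Int :=
  match (PySem.Dict.ofList response).get? "result" with
  | none => ([], 0)   -- KeyError('result'): excluded by Pre_
  | some result =>
    match (if result ≠ "not found" then
        (PySem.Dict.ofList response).items.findSome? (fun kv =>
          if kv.1 = "result" then none
          else (pvSplit result).findSome? (fun word => pvTryWindow (pvSplit kv.2) word spander))
      else none) with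
    | some out => out   -- the early 'return' in the scan
    | none =>
      match (PySem.Dict.ofList response).get? "Doc0" with
      | some doc => (pvSplit doc, 0)
      | none => ([], 0)   -- KeyError('Doc0'): excluded by Pre_

-- ===== PRECONDITION & SPEC =====
-- Pre_ excludes exactly the inputs on which the Python raises KeyError: the key 'result'
-- missing, or the fallback line reached (result == 'not found', or no shared word in any
-- other field) with the key 'Doc0' missing.
def Pre_rougueLiteTest (response : List (String × String)) (spander : Int) : Prop :=
  (PySem.Dict.ofList response).contains "result" = true ∧
  (((PySem.Dict.ofList response).getD "result" "" = "not found" ∨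
      ¬ ∃ kv ∈ (PySem.Dict.ofList response).items, kv.1 ≠ "result" ∧
          ∃ w ∈ pvSplit ((PySem.Dict.ofList response).getD "result" ""), w ∈ pvSplit kv.2) →
    (PySem.Dict.ofList response).contains "Doc0" = true)

instance (response : List (String × String)) (spander : Int) : Decidable (Pre_rougueLiteTest response spander) := by
  unfold Pre_rougueLiteTest; infer_instance

def pvWitness_rougueLiteTest : (List (String × String)) × Int :=
  ([("result", "box"), ("Doc0", "a box here")], 1)

def Spec_rougueLiteTest (response : List (String × String)) (spander : Int) (out : List String × Int) : Prop := out = rougueLiteTest_alt response spander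
instance (response : List (String × String)) (spander : Int) (out : List String × Int) : Decidable (Spec_rougueLiteTest response spander out) := by unfold Spec_rougueLiteTest; infer_instance

-- ===== CLAIM (what is proved, stated in full; the proofs are below) =====
def Claim_equal_rougueLiteTest : Prop := ∀ (response : List (String × String)) (spander : Int), Dom_rougueLiteTest response spander → Pre_rougueLiteTest response spander → Spec_rougueLiteTest response spander (rougueLiteTest response spander)

-- ===== LEMMAS AND PROOFS =====

-- go never returns the empty list of pieces
theorem pv_go_ne_nil (fuel : Nat) (l cur : List Char) (acc : List (List Char)) :
    PySem.Chars.splitOn.go [' '] fuel l cur acc ≠ [] := by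
  induction fuel generalizing l cur acc with
  | zero => simp [PySem.Chars.splitOn.go]
  | succ fuel ih =>
    cases l with
    | nil => simp [PySem.Chars.splitOn.go]
    | cons c rest =>
      rw [PySem.Chars.splitOn.go]
      split <;> apply ih

-- with enough fuel, no produced piece contains the separator character
theorem pv_go_nospace (fuel : Nat) (l cur : List Char) (acc : List (List Char))
    (hf : l.length < fuel) (hc : ' ' ∉ cur) (ha : ∀ w ∈ acc, ' ' ∉ w) :
    ∀ w ∈ PySem.Chars.splitOn.go [' '] fuel l cur acc, ' ' ∉ w := by
  induction fuel generalizing l cur acc with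
  | zero => omega
  | succ fuel ih =>
    cases l with
    | nil =>
      rw [PySem.Chars.splitOn.go]
      · intro w hw
        simp only [List.mem_reverse, List.mem_cons] at hw
        rcases hw with h | h
        · subst h; simpa using hc
        · exact ha w h
      · omega
    | cons c rest =>
      rw [PySem.Chars.splitOn.go]
      split
      · apply ih
        · simp at hf ⊢; omega
        · simp
        · intro w hw
          rcases List.mem_cons.mp hw with h | h
          · subst h; simpa using hc
          · exact ha w h
      · rename_i hpre
        apply ih
        · simp at hf ⊢; omega
        · intro hmem
          rcases List.mem_cons.mp hmem with h | h
          · apply hpre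
            simp [List.isPrefixOf, ← h]
          · exact hc h
        · exact ha

theorem pvSplit_ne_nil (s : String) : pvSplit s ≠ [] := by
  unfold pvSplit PySem.Chars.splitOn
  intro h
  exact pv_go_ne_nil _ _ _ _ (by simpa using h)

theorem pvSplit_nospace (s : String) : ∀ w ∈ pvSplit s, ' ' ∉ w.toList := by
  unfold pvSplit PySem.Chars.splitOn
  intro w hw
  rcases List.mem_map.mp hw with ⟨cs, hcs, rfl⟩
  have := pv_go_nospace (s.toList.length + 1) s.toList [] [] (by omega) (by simp) (by simp) cs hcs
  simpa using this

theorem pv_findSome?_congr {α β : Type} (l : List α) (f g : α → Option β)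
    (h : ∀ x ∈ l, f x = g x) : l.findSome? f = l.findSome? g := by
  induction l with
  | nil => rfl
  | cons a t ih => simp_all [List.findSome?_cons]

theorem pvTryWindow_of_not_mem (hay : List String) (word : String) (spander : Int)
    (h : word ∉ hay) : pvTryWindow hay word spander = none := by
  unfold pvTryWindow
  rw [(PySem.List.index?_eq_none_iff hay word).mpr h]

theorem pv_findSome?_singleton {α β : Type} (f : α → Option β) (a : α) :
    [a].findSome? f = f a := by
  cases h : f a <;> simp [h]

-- any window of at least two words, joined with ' ', contains a space, hence is not a token
theorem pv_join_two_not_token (hay : List String) (a b : String) (t : List String)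
    (hhay : ∀ w ∈ hay, ' ' ∉ w.toList) :
    PySem.Str.join " " (a :: b :: t) ∉ hay := by
  intro hmem
  apply hhay _ hmem
  simp only [PySem.Str.join, PySem.Chars.join_cons_cons, List.map_cons]
  simp

-- the r-loop of A collapses to B's direct word scan
theorem pv_loop_collapse (words hay : List String) (spander : Int)
    (hwne : words ≠ [])
    (hhay : ∀ w ∈ hay, ' ' ∉ w.toList) :
    (PySem.List.pyRange (PySem.List.len words) 0 (-1)).findSome? (fun r =>
      (PySem.List.pyRange 0 (pvCeilDiv (PySem.List.len words) r) 1).findSome? (fun s =>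
        pvTryWindow hay
          (PySem.Str.join " " (PySem.List.slice words (some s) (some (r + s)))) spander))
    = words.findSome? (fun word => pvTryWindow hay word spander) := by
  have hn : (1:Int) ≤ (words.length : Int) := by
    have := List.length_pos_iff.mpr hwne
    exact_mod_cast this
  have hlen : PySem.List.len words = (words.length : Int) := rfl
  rw [hlen]
  -- windows of two or more words never match: the whole r-loop except r = 1 yields none
  have hdead : ∀ r : Int, 2 ≤ r → r ≤ (words.length : Int) →
      (PySem.List.pyRange 0 (pvCeilDiv (words.length : Int) r) 1).findSome? (fun s =>
        pvTryWindow hay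
          (PySem.Str.join " " (PySem.List.slice words (some s) (some (r + s)))) spander) = none := by
    intro r hr2 hrn
    rw [List.findSome?_eq_none_iff]
    intro s hs
    rw [PySem.List.mem_pyRange_one] at hs
    obtain ⟨hs0, hsc⟩ := hs
    have hq : pvCeilDiv (words.length : Int) r * r
        = (words.length : Int) + PySem.Int.mod (-(words.length : Int)) r := by
      have h := PySem.Int.floordiv_mul_add_mod (-(words.length : Int)) r
      unfold pvCeilDiv
      rw [neg_mul]
      omega
    have hmod0 : 0 ≤ PySem.Int.mod (-(words.length : Int)) r :=
      PySem.Int.mod_nonneg _ (by omega)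
    have hmodlt : PySem.Int.mod (-(words.length : Int)) r < r :=
      PySem.Int.mod_lt _ (by omega)
    have hsr : s * r < (words.length : Int) := by nlinarith
    have h2s : 2 * s ≤ s * r := by nlinarith
    rw [PySem.List.slice_toNat words hs0 (by omega)]
    have hex : ∃ a b t, List.take ((r + s).toNat - s.toNat) (List.drop s.toNat words)
        = a :: b :: t := by
      have hlen2 : 2 ≤ (List.take ((r + s).toNat - s.toNat) (List.drop s.toNat words)).length := by
        rw [List.length_take, List.length_drop]
        omega
      rcases h : List.take ((r + s).toNat - s.toNat) (List.drop s.toNat words) with _ | ⟨a, _ | ⟨b, t⟩⟩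
      · rw [h] at hlen2; simp at hlen2
      · rw [h] at hlen2; simp at hlen2
      · exact ⟨a, b, t, rfl⟩
    obtain ⟨a, b, t, hws⟩ := hex
    rw [hws]
    exact pvTryWindow_of_not_mem hay _ spander (pv_join_two_not_token hay a b t hhay)
  -- split off the final r = 1 iteration
  have hsplit : PySem.List.pyRange (words.length : Int) 0 (-1)
      = PySem.List.pyRange (words.length : Int) 1 (-1) ++ [1] := by
    rw [PySem.List.pyRange_neg_one_eq_reverse, PySem.List.pyRange_neg_one_eq_reverse]
    rw [show ((0:Int) + 1) = 1 by ring, show ((1:Int) + 1) = 2 by ring]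
    rw [PySem.List.pyRange_one_append 1 2 ((words.length : Int) + 1) (by omega) (by omega)]
    rw [show (2:Int) = 1 + 1 by ring, PySem.List.pyRange_one_singleton]
    simp
  rw [hsplit, List.findSome?_append]
  have h1 : (PySem.List.pyRange (words.length : Int) 1 (-1)).findSome? (fun r =>
      (PySem.List.pyRange 0 (pvCeilDiv (words.length : Int) r) 1).findSome? (fun s =>
        pvTryWindow hay
          (PySem.Str.join " " (PySem.List.slice words (some s) (some (r + s)))) spander)) = none := by
    rw [List.findSome?_eq_none_iff]
    intro r hr
    rw [PySem.List.mem_pyRange_neg_one] at hr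
    exact hdead r (by omega) (by omega)
  rw [h1, Option.none_or, pv_findSome?_singleton]
  -- the surviving r = 1 pass is exactly B's word-by-word scan
  have hceil1 : pvCeilDiv (words.length : Int) 1 = (words.length : Int) := by
    unfold pvCeilDiv
    rw [PySem.Int.floordiv_eq_ediv_of_pos (by norm_num : (0:Int) < 1)]
    simp
  rw [hceil1]
  conv_rhs => rw [← PySem.List.map_pyGetD_pyRange_zero words ""]
  rw [List.findSome?_map]
  apply pv_findSome?_congr
  intro j hj
  rw [PySem.List.mem_pyRange_one] at hj
  obtain ⟨hj0, hjn⟩ := hj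
  have hk : j.toNat < words.length := by omega
  have harg : PySem.Str.join " " (PySem.List.slice words (some j) (some (1 + j)))
      = PySem.List.pyGetD words j "" := by
    rw [PySem.List.slice_toNat words hj0 (by omega)]
    rw [show (1 + j).toNat - j.toNat = 1 by omega]
    rw [List.drop_eq_getElem_cons hk]
    rw [show (1:Nat) = 0 + 1 by rfl, List.take_succ_cons, List.take_zero]
    rw [PySem.List.pyGetD_of_nonneg words "" hj0]
    rw [List.getD_eq_getElem words "" hk]
    simp [PySem.Str.join, PySem.Chars.join_singleton]
  simp only [Function.comp_def]
  rw [harg]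

-- ===== VERDICT (by name: the statement is the Claim_ definition above) =====
theorem rougueLiteTest_spec : Claim_equal_rougueLiteTest := by
  intro response spander _ _
  show rougueLiteTest response spander = rougueLiteTest_alt response spander
  unfold rougueLiteTest rougueLiteTest_alt
  cases hres : (PySem.Dict.ofList response).get? "result" with
  | none => rfl
  | some result =>
    dsimp only
    have hnd := PySem.Dict.nodup_keys_ofList (κ := String) (ν := String) response
    have hhit : (if result ≠ "not found" then
          (PySem.Dict.keys (PySem.Dict.ofList response)).findSome? (fun i =>
            if i ≠ "result" then
              match (PySem.Dict.ofList response).get? i with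
              | none => none
              | some text =>
                (PySem.List.pyRange (PySem.List.len (pvSplit result)) 0 (-1)).findSome? (fun r =>
                  (PySem.List.pyRange 0 (pvCeilDiv (PySem.List.len (pvSplit result)) r) 1).findSome? (fun s =>
                    pvTryWindow (pvSplit text)
                      (PySem.Str.join " " (PySem.List.slice (pvSplit result) (some s) (some (r + s)))) spander))
            else none)
        else none)
        = (if result ≠ "not found" then
          (PySem.Dict.ofList response).items.findSome? (fun kv =>
            if kv.1 = "result" then none
            else (pvSplit result).findSome? (fun word => pvTryWindow (pvSplit kv.2) word spander))
        else none) := by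
      by_cases hnf : result = "not found"
      · simp [hnf]
      · rw [if_pos hnf, if_pos hnf]
        rw [show PySem.Dict.keys (PySem.Dict.ofList response)
              = ((PySem.Dict.ofList response).items.map (fun p => p.1)) from rfl]
        rw [List.findSome?_map]
        apply pv_findSome?_congr
        intro kv hkv
        have hget := PySem.Dict.get?_of_mem_items _ hkv hnd
        simp only [Function.comp_def]
        by_cases h1 : kv.1 = "result"
        · simp [h1]
        · rw [if_pos h1, if_neg h1, hget]
          exact pv_loop_collapse (pvSplit result) (pvSplit kv.2) spander
            (pvSplit_ne_nil result) (pvSplit_nospace kv.2)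
    rw [hhit]
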